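-- pv_equiv track=rewrite | github.com/xinzengxx/learn-plan | learn-plan/learn_plan.py | _humanize_workflow_issue
-- ===== SOURCE A (Python) =====
-- from typing import Any
--
-- def _humanize_workflow_issue(issue: Any) -> str:
--     text = str(issue or "").strip()
--     if not text:
--         return ""
--     mapping = {
--         "planning.plan_candidate": "正式计划所需的结构化 plan candidate 还没有准备好",
--         "diagnostic.follow_up_pending": "起点诊断尚未完成，仍需继续下一轮诊断或收口诊断结果。请继续 diagnostic workflow，不要手动补中间态 JSON。",
--         "approval.pending_decisions": "计划草案仍有待确认决策，尚不能进入正式落盘。请回到 approval 阶段完成确认，不要手动改 approval JSON。",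
--         "approval.ready_for_execution": "approval gate 尚未确认 ready_for_execution。请回到 approval 阶段重新确认，不要手动补 ready 标记。",
--         "research.report_status": "research 报告尚未完成或未达到可消费状态。请回到 research 阶段重新产出，不要手动补 research JSON。",
--         "research.plan_status": "research plan 尚未确认，不能把 report 当作完成态。请回到 research 阶段确认，不要手动改研究中间态。",
--         "research.user_review_confirmation": "目的解析报告尚未经过用户审阅确认。请停留在 research 阶段等待确认，不要手动把 research.json 改成已确认。",
--         "research.diagnostic_scope": "research 已确认需要测试，但尚未形成可机器消费的 diagnostic scope。请回到 research 阶段重新产出，不要手动补 diagnostic blueprint。",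
--         "research.diagnostic_scope.target_capability_ids": "research 的测试范围还没明确接下来要测哪些能力。请回到 research 阶段重新产出，不要手动补 diagnostic JSON。",
--         "research.diagnostic_scope.scoring_dimensions": "research 的测试范围还没明确这轮测试的评分维度。请回到 research 阶段重新产出，不要手动补 diagnostic JSON。",
--         "research.diagnostic_scope.gap_judgement_basis": "research 的测试范围还没明确如何判断与目标水平的差距。请回到 research 阶段重新产出，不要手动补 diagnostic JSON。",
--         "diagnostic.research_scope": "research 的测试范围还没有进入 diagnostic 链路。请先回到 research-report 阶段完成承接，不要手动编辑 diagnostic blueprint。",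
--         "diagnostic.scope_alignment": "当前 diagnostic blueprint 没有承接 research 已定义的测试范围。请回到 diagnostic 阶段重新生成，不要手动补 blueprint 字段。",
--         "clarification.max_assessment_rounds_preference": "还未确认起始测评最多接受几轮",
--         "clarification.questions_per_round_preference": "还未确认起始测评每轮最多几题",
--         "formal_plan.mode_not_finalize": "当前还不在 finalize 模式，正式计划写入被阻止",
--         "formal_plan.blocking_stage.planning": "当前仍处于 finalize 前的 planning 过渡态，正式计划写入被阻止",
--         "formal_plan.blocking_stage.diagnostic": "当前仍卡在 diagnostic 阶段，正式计划写入被阻止",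
--         "formal_plan.missing_requirements": "正式计划写入所需条件尚未补齐",
--         "diagnostic.preflight_invalid": "诊断启动前自检未通过，当前不能直接启动 initial-test session",
--         "diagnostic.preflight_blockers": "诊断蓝图仍不完整，需先补齐 diagnostic blueprint 再启动 session",
--     }
--     if text in mapping:
--         return mapping[text]
--     prefix_mapping = {
--         "clarification.": "clarification 仍有未补齐项：",
--         "research.": "research 仍有未补齐项：",
--         "diagnostic.": "diagnostic 仍有未补齐项：",
--         "approval.": "approval 仍有未补齐项：",
--         "planning.": "planning 仍有未补齐项：",
--         "formal_plan.": "正式计划写入仍受阻：",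
--     }
--     for prefix, label in prefix_mapping.items():
--         if text.startswith(prefix):
--             return f"{label}{text[len(prefix):]}"
--     return text
-- ===== SOURCE B (Python) =====
-- from typing import Any
--
-- def _humanize_workflow_issue(issue: Any) -> str:
--     text = str(issue or "").strip()
--     if not text:
--         return ""
--     mapping = {
--         "planning.plan_candidate": "正式计划所需的结构化 plan candidate 还没有准备好",
--         "diagnostic.follow_up_pending": "起点诊断尚未完成，仍需继续下一轮诊断或收口诊断结果。请继续 diagnostic workflow，不要手动补中间态 JSON。",
--         "approval.pending_decisions": "计划草案仍有待确认决策，尚不能进入正式落盘。请回到 approval 阶段完成确认，不要手动改 approval JSON。",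
--         "approval.ready_for_execution": "approval gate 尚未确认 ready_for_execution。请回到 approval 阶段重新确认，不要手动补 ready 标记。",
--         "research.report_status": "research 报告尚未完成或未达到可消费状态。请回到 research 阶段重新产出，不要手动补 research JSON。",
--         "research.plan_status": "research plan 尚未确认，不能把 report 当作完成态。请回到 research 阶段确认，不要手动改研究中间态。",
--         "research.user_review_confirmation": "目的解析报告尚未经过用户审阅确认。请停留在 research 阶段等待确认，不要手动把 research.json 改成已确认。",
--         "research.diagnostic_scope": "research 已确认需要测试，但尚未形成可机器消费的 diagnostic scope。请回到 research 阶段重新产出，不要手动补 diagnostic blueprint。",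
--         "research.diagnostic_scope.target_capability_ids": "research 的测试范围还没明确接下来要测哪些能力。请回到 research 阶段重新产出，不要手动补 diagnostic JSON。",
--         "research.diagnostic_scope.scoring_dimensions": "research 的测试范围还没明确这轮测试的评分维度。请回到 research 阶段重新产出，不要手动补 diagnostic JSON。",
--         "research.diagnostic_scope.gap_judgement_basis": "research 的测试范围还没明确如何判断与目标水平的差距。请回到 research 阶段重新产出，不要手动补 diagnostic JSON。",
--         "diagnostic.research_scope": "research 的测试范围还没有进入 diagnostic 链路。请先回到 research-report 阶段完成承接，不要手动编辑 diagnostic blueprint。",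
--         "diagnostic.scope_alignment": "当前 diagnostic blueprint 没有承接 research 已定义的测试范围。请回到 diagnostic 阶段重新生成，不要手动补 blueprint 字段。",
--         "clarification.max_assessment_rounds_preference": "还未确认起始测评最多接受几轮",
--         "clarification.questions_per_round_preference": "还未确认起始测评每轮最多几题",
--         "formal_plan.mode_not_finalize": "当前还不在 finalize 模式，正式计划写入被阻止",
--         "formal_plan.blocking_stage.planning": "当前仍处于 finalize 前的 planning 过渡态，正式计划写入被阻止",
--         "formal_plan.blocking_stage.diagnostic": "当前仍卡在 diagnostic 阶段，正式计划写入被阻止",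
--         "formal_plan.missing_requirements": "正式计划写入所需条件尚未补齐",
--         "diagnostic.preflight_invalid": "诊断启动前自检未通过，当前不能直接启动 initial-test session",
--         "diagnostic.preflight_blockers": "诊断蓝图仍不完整，需先补齐 diagnostic blueprint 再启动 session",
--     }
--     if text in mapping:
--         return mapping[text]
--     prefix_mapping = {
--         "clarification.": "clarification 仍有未补齐项：",
--         "research.": "research 仍有未补齐项：",
--         "diagnostic.": "diagnostic 仍有未补齐项：",
--         "approval.": "approval 仍有未补齐项：",
--         "planning.": "planning 仍有未补齐项：",
--         "formal_plan.": "正式计划写入仍受阻：",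
--     }
--     dot = text.find(".")
--     if dot == -1:
--         return text
--     label = prefix_mapping.get(text[:dot + 1])
--     if label is None:
--         return text
--     return label + text[dot + 1:]
-- ===== Notes on version B (the rewrite author's own statement) =====
-- stated objective: idiomatic
-- what changed: B replaces A's ordered scan over the six prefix→label entries (startswith on each) by computing the candidate key once — the first segment of the text up to and including its first dot — and doing a single dict lookup.
import Mathlib
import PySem

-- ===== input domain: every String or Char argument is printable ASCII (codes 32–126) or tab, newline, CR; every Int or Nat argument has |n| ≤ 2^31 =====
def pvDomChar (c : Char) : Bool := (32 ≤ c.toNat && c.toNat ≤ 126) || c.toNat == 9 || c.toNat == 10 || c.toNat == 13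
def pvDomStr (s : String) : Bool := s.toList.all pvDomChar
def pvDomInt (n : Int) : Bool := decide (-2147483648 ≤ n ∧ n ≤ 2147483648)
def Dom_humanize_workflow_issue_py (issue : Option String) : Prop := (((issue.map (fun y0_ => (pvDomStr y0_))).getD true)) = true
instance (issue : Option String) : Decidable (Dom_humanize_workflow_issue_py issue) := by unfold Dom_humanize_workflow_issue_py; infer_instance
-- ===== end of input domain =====

-- B replaces A's linear scan over the six prefix labels by computing the first-dot
-- key text[:dot+1] once and doing a single dict lookup (objective: idiomatic/alternative; same cost at this size).

-- shared literal tables (the two Python versions carry identical dict literals)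
def hwMappingPairs : List (String × String) :=
  [("planning.plan_candidate", "正式计划所需的结构化 plan candidate 还没有准备好"),
   ("diagnostic.follow_up_pending", "起点诊断尚未完成，仍需继续下一轮诊断或收口诊断结果。请继续 diagnostic workflow，不要手动补中间态 JSON。"),
   ("approval.pending_decisions", "计划草案仍有待确认决策，尚不能进入正式落盘。请回到 approval 阶段完成确认，不要手动改 approval JSON。"),
   ("approval.ready_for_execution", "approval gate 尚未确认 ready_for_execution。请回到 approval 阶段重新确认，不要手动补 ready 标记。"),
   ("research.report_status", "research 报告尚未完成或未达到可消费状态。请回到 research 阶段重新产出，不要手动补 research JSON。"),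
   ("research.plan_status", "research plan 尚未确认，不能把 report 当作完成态。请回到 research 阶段确认，不要手动改研究中间态。"),
   ("research.user_review_confirmation", "目的解析报告尚未经过用户审阅确认。请停留在 research 阶段等待确认，不要手动把 research.json 改成已确认。"),
   ("research.diagnostic_scope", "research 已确认需要测试，但尚未形成可机器消费的 diagnostic scope。请回到 research 阶段重新产出，不要手动补 diagnostic blueprint。"),
   ("research.diagnostic_scope.target_capability_ids", "research 的测试范围还没明确接下来要测哪些能力。请回到 research 阶段重新产出，不要手动补 diagnostic JSON。"),
   ("research.diagnostic_scope.scoring_dimensions", "research 的测试范围还没明确这轮测试的评分维度。请回到 research 阶段重新产出，不要手动补 diagnostic JSON。"),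
   ("research.diagnostic_scope.gap_judgement_basis", "research 的测试范围还没明确如何判断与目标水平的差距。请回到 research 阶段重新产出，不要手动补 diagnostic JSON。"),
   ("diagnostic.research_scope", "research 的测试范围还没有进入 diagnostic 链路。请先回到 research-report 阶段完成承接，不要手动编辑 diagnostic blueprint。"),
   ("diagnostic.scope_alignment", "当前 diagnostic blueprint 没有承接 research 已定义的测试范围。请回到 diagnostic 阶段重新生成，不要手动补 blueprint 字段。"),
   ("clarification.max_assessment_rounds_preference", "还未确认起始测评最多接受几轮"),
   ("clarification.questions_per_round_preference", "还未确认起始测评每轮最多几题"),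
   ("formal_plan.mode_not_finalize", "当前还不在 finalize 模式，正式计划写入被阻止"),
   ("formal_plan.blocking_stage.planning", "当前仍处于 finalize 前的 planning 过渡态，正式计划写入被阻止"),
   ("formal_plan.blocking_stage.diagnostic", "当前仍卡在 diagnostic 阶段，正式计划写入被阻止"),
   ("formal_plan.missing_requirements", "正式计划写入所需条件尚未补齐"),
   ("diagnostic.preflight_invalid", "诊断启动前自检未通过，当前不能直接启动 initial-test session"),
   ("diagnostic.preflight_blockers", "诊断蓝图仍不完整，需先补齐 diagnostic blueprint 再启动 session")]

def hwPrefixPairs : List (String × String) :=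
  [("clarification.", "clarification 仍有未补齐项："),
   ("research.", "research 仍有未补齐项："),
   ("diagnostic.", "diagnostic 仍有未补齐项："),
   ("approval.", "approval 仍有未补齐项："),
   ("planning.", "planning 仍有未补齐项："),
   ("formal_plan.", "正式计划写入仍受阻：")]

-- ===== PORT A =====
-- A scans prefix_mapping.items() in order, returning on the first startswith hit.
def hwLoopA (text : String) : List (String × String) → String
  | [] => text
  | (p, lbl) :: rest =>
      if PySem.Str.startswith text p then lbl ++ PySem.Str.slice text (some (PySem.Str.len p)) none
      else hwLoopA text rest

def humanize_workflow_issue_py (issue : Option String) : String :=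
  let text := PySem.Str.strip (issue.getD "")
  if text = "" then ""
  else
    match (PySem.Dict.ofList hwMappingPairs).get? text with
    | some msg => msg
    | none => hwLoopA text hwPrefixPairs

-- ===== PORT B =====
-- B computes the key text[:dot+1] from the first '.' and does one dict lookup.
def hwAltTail (text : String) : String :=
  let dot := PySem.Str.find text "."
  if dot = -1 then text
  else
    match (PySem.Dict.ofList hwPrefixPairs).get? (PySem.Str.slice text none (some (dot + 1))) with
    | none => text
    | some lbl => lbl ++ PySem.Str.slice text (some (dot + 1)) none

def humanize_workflow_issue_py_alt (issue : Option String) : String :=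
  let text := PySem.Str.strip (issue.getD "")
  if text = "" then ""
  else
    match (PySem.Dict.ofList hwMappingPairs).get? text with
    | some msg => msg
    | none => hwAltTail text

-- ===== PRECONDITION & SPEC =====
def Spec_humanize_workflow_issue_py (issue : Option String) (out : String) : Prop := out = humanize_workflow_issue_py_alt issue
instance (issue : Option String) (out : String) : Decidable (Spec_humanize_workflow_issue_py issue out) := by unfold Spec_humanize_workflow_issue_py; infer_instance

-- ===== CLAIM (what is proved, stated in full; the proofs are below) =====
def Claim_equal_humanize_workflow_issue_py : Prop := ∀ (issue : Option String), Dom_humanize_workflow_issue_py issue → Spec_humanize_workflow_issue_py issue (humanize_workflow_issue_py issue)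

-- ===== LEMMAS AND PROOFS =====

-- the first '.' of a string starting with seg ++ ['.'] ('.' not in seg) is at index seg.length
lemma hw_find_dot {seg cs : List Char} (hseg : '.' ∉ seg)
    (hpre : (seg ++ ['.']) <+: cs) :
    PySem.Chars.find cs ['.'] = (seg.length : Int) := by
  obtain ⟨rest, hrest⟩ := hpre
  have hinf : ['.'] <:+: cs := ⟨seg, rest, by simp [← hrest]⟩
  have hnn : 0 ≤ PySem.Chars.find cs ['.'] := (PySem.Chars.find_nonneg_iff _ _).mpr hinf
  obtain ⟨hat, hmin⟩ := PySem.Chars.find_spec hnn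
  set k := (PySem.Chars.find cs ['.']).toNat with hk
  have hdropseg : cs.drop seg.length = '.' :: rest := by
    rw [← hrest, List.append_assoc]
    exact List.drop_left
  have hk1 : k ≤ seg.length := by
    by_contra hgt
    exact hmin seg.length (by omega) (by rw [hdropseg]; exact ⟨rest, rfl⟩)
  have hk2 : seg.length ≤ k := by
    by_contra hc
    have hlt : k < seg.length := by omega
    have hhd : cs[k]? = some '.' := by
      obtain ⟨u, hu⟩ := hat
      rw [← List.head?_drop, ← hu]; rfl
    have heq : cs[k]? = seg[k]? := by
      rw [← hrest, List.append_assoc, List.getElem?_append_left hlt]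
    rw [heq, List.getElem?_eq_getElem hlt] at hhd
    have : seg[k] = '.' := by simpa using hhd
    exact hseg (this ▸ List.getElem_mem hlt)
  have hkn := Int.toNat_of_nonneg hnn
  omega

-- positive case: text starts with a table prefix P = seg ++ "." → B's computed key is P
lemma hw_pos (t P lbl : String) (seg : List Char)
    (hPl : P.toList = seg ++ ['.']) (hseg : '.' ∉ seg)
    (hget : (PySem.Dict.ofList hwPrefixPairs).get? P = some lbl)
    (h : PySem.Str.startswith t P = true) :
    hwAltTail t = lbl ++ PySem.Str.slice t (some (PySem.Str.len P)) none := by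
  rw [PySem.Str.startswith_eq, PySem.Chars.startswith_iff, hPl] at h
  have hfind' : PySem.Str.find t "." = (seg.length : Int) := by
    rw [PySem.Str.find_eq]
    exact hw_find_dot hseg h
  have hlen : PySem.Str.len P = (seg.length : Int) + 1 := by
    rw [PySem.Str.len_eq, hPl]
    simp
  have hkey : PySem.Str.slice t none (some ((seg.length : Int) + 1)) = P := by
    apply String.toList_inj.mp
    rw [PySem.Str.toList_slice, PySem.Chars.slice_eq_listSlice, hPl]
    have hc : ((seg.length : Int) + 1) = ((seg.length + 1 : Nat) : Int) := by push_cast; ring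
    rw [hc, PySem.List.slice_to_natCast]
    have htake := List.prefix_iff_eq_take.mp h
    simpa using htake.symm
  simp only [hwAltTail, hfind']
  rw [if_neg (by omega : ¬ ((seg.length : Int) = -1)), hkey, hget, hlen]

-- negative: if text does not start with P then B's computed key is not P
lemma hw_key_ne (t P : String) (h0 : 0 ≤ PySem.Str.find t ".")
    (h : ¬ PySem.Str.startswith t P = true) :
    PySem.Str.slice t none (some (PySem.Str.find t "." + 1)) ≠ P := by
  intro hk
  apply h
  rw [PySem.Str.startswith_eq, PySem.Chars.startswith_iff, ← hk,
    PySem.Str.toList_slice, PySem.Chars.slice_eq_listSlice]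
  have hs := PySem.List.slice_to (xs := t.toList)
    (b := PySem.Str.find t "." + 1) (by omega)
  rw [hs]
  exact List.take_prefix _ _

-- if no prefix of the table matches, B returns the text unchanged
lemma hw_neg (t : String)
    (h1 : ¬ PySem.Str.startswith t "clarification." = true)
    (h2 : ¬ PySem.Str.startswith t "research." = true)
    (h3 : ¬ PySem.Str.startswith t "diagnostic." = true)
    (h4 : ¬ PySem.Str.startswith t "approval." = true)
    (h5 : ¬ PySem.Str.startswith t "planning." = true)
    (h6 : ¬ PySem.Str.startswith t "formal_plan." = true) :
    hwAltTail t = t := by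
  simp only [hwAltTail]
  by_cases hd : PySem.Str.find t "." = -1
  · rw [if_pos hd]
  · have hm1 : (-1 : Int) ≤ PySem.Chars.find t.toList ['.'] := PySem.Chars.neg_one_le_find _ _
    have h0 : 0 ≤ PySem.Str.find t "." := by
      rw [PySem.Str.find_eq] at hd ⊢
      have : ".".toList = ['.'] := by decide
      rw [this] at hd ⊢
      omega
    rw [if_neg hd]
    rcases hg : (PySem.Dict.ofList hwPrefixPairs).get?
        (PySem.Str.slice t none (some (PySem.Str.find t "." + 1))) with _ | lbl
    · simp
    · exfalso
      have hmem := PySem.Dict.mem_items_of_get?_eq_some _ hg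
      have hit : (PySem.Dict.ofList hwPrefixPairs).items = hwPrefixPairs := by rfl
      rw [hit] at hmem
      simp only [hwPrefixPairs, List.mem_cons, List.not_mem_nil, or_false, Prod.mk.injEq] at hmem
      rcases hmem with ⟨hk, _⟩ | ⟨hk, _⟩ | ⟨hk, _⟩ | ⟨hk, _⟩ | ⟨hk, _⟩ | ⟨hk, _⟩
      · exact hw_key_ne t _ h0 h1 hk
      · exact hw_key_ne t _ h0 h2 hk
      · exact hw_key_ne t _ h0 h3 hk
      · exact hw_key_ne t _ h0 h4 hk
      · exact hw_key_ne t _ h0 h5 hk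
      · exact hw_key_ne t _ h0 h6 hk

-- the two tail computations agree on every text
lemma hw_branch (t : String) : hwLoopA t hwPrefixPairs = hwAltTail t := by
  by_cases h1 : PySem.Str.startswith t "clarification." = true
  · rw [hw_pos t "clarification." "clarification 仍有未补齐项：" ("clarification".toList) (by decide) (by decide) (by rfl) h1]
    simp only [hwLoopA, hwPrefixPairs]
    rw [if_pos h1]
  · by_cases h2 : PySem.Str.startswith t "research." = true
    · rw [hw_pos t "research." "research 仍有未补齐项：" ("research".toList) (by decide) (by decide) (by rfl) h2]
      simp only [hwLoopA, hwPrefixPairs]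
      rw [if_neg h1, if_pos h2]
    · by_cases h3 : PySem.Str.startswith t "diagnostic." = true
      · rw [hw_pos t "diagnostic." "diagnostic 仍有未补齐项：" ("diagnostic".toList) (by decide) (by decide) (by rfl) h3]
        simp only [hwLoopA, hwPrefixPairs]
        rw [if_neg h1, if_neg h2, if_pos h3]
      · by_cases h4 : PySem.Str.startswith t "approval." = true
        · rw [hw_pos t "approval." "approval 仍有未补齐项：" ("approval".toList) (by decide) (by decide) (by rfl) h4]
          simp only [hwLoopA, hwPrefixPairs]
          rw [if_neg h1, if_neg h2, if_neg h3, if_pos h4]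
        · by_cases h5 : PySem.Str.startswith t "planning." = true
          · rw [hw_pos t "planning." "planning 仍有未补齐项：" ("planning".toList) (by decide) (by decide) (by rfl) h5]
            simp only [hwLoopA, hwPrefixPairs]
            rw [if_neg h1, if_neg h2, if_neg h3, if_neg h4, if_pos h5]
          · by_cases h6 : PySem.Str.startswith t "formal_plan." = true
            · rw [hw_pos t "formal_plan." "正式计划写入仍受阻：" ("formal_plan".toList) (by decide) (by decide) (by rfl) h6]
              simp only [hwLoopA, hwPrefixPairs]
              rw [if_neg h1, if_neg h2, if_neg h3, if_neg h4, if_neg h5, if_pos h6]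
            · rw [hw_neg t h1 h2 h3 h4 h5 h6]
              simp only [hwLoopA, hwPrefixPairs]
              rw [if_neg h1, if_neg h2, if_neg h3, if_neg h4, if_neg h5, if_neg h6]

-- ===== VERDICT (by name: the statement is the Claim_ definition above) =====
theorem humanize_workflow_issue_py_spec : Claim_equal_humanize_workflow_issue_py := by
  intro issue _
  unfold Spec_humanize_workflow_issue_py humanize_workflow_issue_py humanize_workflow_issue_py_alt
  by_cases h : PySem.Str.strip (issue.getD "") = ""
  · simp [h]
  · rw [if_neg h, if_neg h]
    rcases hm : (PySem.Dict.ofList hwMappingPairs).get? (PySem.Str.strip (issue.getD "")) with _ | msg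
    · exact hw_branch _
    · rfl
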